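-- pv_equiv track=rewrite | github.com/gitmehedi/algoExpert | sliding_window_technique.py | findLongestSubstringWithK
-- ===== SOURCE A (Python) =====
-- def findLongestSubstringWithK(s, k):
--     length = len(s)
--     window = set()
--     res = ''
--
--     for i in range(length - k + 1):
--         window = s[i:i + k]
--         unique = set(s[i:i + k])
--         if len(window) == len(unique):
--             res = window
--
--     return res
-- ===== SOURCE B (Python) =====
-- def findLongestSubstringWithK(s, k):
--     # O(n) sliding window: one pass, tracking the earliest start of a
--     # duplicate-free window ending at each position via last-seen indices.
--     if k <= 0:
--         return ''
--     last_seen = {}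
--     start = 0            # smallest i such that s[i:j+1] has all distinct chars
--     best = -1            # start index of the last all-distinct window of length k
--     for j, c in enumerate(s):
--         prev = last_seen.get(c, -1)
--         if prev >= start:
--             start = prev + 1
--         last_seen[c] = j
--         if j - start + 1 >= k:
--             best = j - k + 1
--     if best < 0:
--         return ''
--     return s[best:best + k]
-- ===== Notes on version B (the rewrite author's own statement) =====
-- stated objective: faster
-- what changed: Replaced the re-scan of every length-k window (building a fresh set per window) by a single O(n) sliding-window pass that maintains last-seen indices and the earliest start of a duplicate-free window, recording the start of the last valid window.
import Mathlib
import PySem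

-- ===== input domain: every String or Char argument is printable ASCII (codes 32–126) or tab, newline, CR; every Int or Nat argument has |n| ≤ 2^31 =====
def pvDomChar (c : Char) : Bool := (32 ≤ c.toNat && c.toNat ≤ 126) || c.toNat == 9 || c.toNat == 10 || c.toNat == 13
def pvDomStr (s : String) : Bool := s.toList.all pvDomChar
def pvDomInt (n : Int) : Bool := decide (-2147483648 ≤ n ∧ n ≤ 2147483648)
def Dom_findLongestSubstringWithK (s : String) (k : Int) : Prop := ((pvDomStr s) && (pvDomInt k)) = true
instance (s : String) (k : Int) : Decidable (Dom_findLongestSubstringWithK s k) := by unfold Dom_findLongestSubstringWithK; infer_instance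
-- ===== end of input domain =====

-- B replaces A's per-window re-scan (a fresh set per window) by one sliding-window pass
-- keeping last-seen indices and the start of the last duplicate-free window; return values agree.

-- ===== PORT A =====
def findLongestSubstringWithK (s : String) (k : Int) : String :=
  let length : Int := PySem.Str.len s
  -- 'window = set()' in A is dead (overwritten before first use); res starts as ''
  let res : List Char := []
  let res := (PySem.List.pyRange 0 (length - k + 1) 1).foldl (fun res i =>
    let window := PySem.List.slice s.toList (some i) (some (i + k))
    let unique : PySem.Set Char := PySem.Set.ofList window
    if window.length == unique.length then window else res) res
  String.ofList res

-- ===== PORT B =====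
-- the loop body of B, on state (last_seen, start, best) and element (j, c)
def bStep (k : Int) (acc : PySem.Dict Char Int × Int × Int) (jc : Int × Char) :
    PySem.Dict Char Int × Int × Int :=
  let prev := acc.1.getD jc.2 (-1)
  let start := if prev ≥ acc.2.1 then prev + 1 else acc.2.1
  let lastSeen := acc.1.insert jc.2 jc.1
  let best := if jc.1 - start + 1 ≥ k then jc.1 - k + 1 else acc.2.2
  (lastSeen, start, best)

def findLongestSubstringWithK_alt (s : String) (k : Int) : String :=
  if k ≤ 0 then "" else
  let st := (PySem.List.enumerate s.toList 0).foldl (bStep k) (PySem.Dict.empty, 0, -1)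
  if st.2.2 < 0 then "" else
    String.ofList (PySem.List.slice s.toList (some st.2.2) (some (st.2.2 + k)))

-- ===== PRECONDITION & SPEC =====
def Spec_findLongestSubstringWithK (s : String) (k : Int) (out : String) : Prop := out = findLongestSubstringWithK_alt s k
instance (s : String) (k : Int) (out : String) : Decidable (Spec_findLongestSubstringWithK s k out) := by unfold Spec_findLongestSubstringWithK; infer_instance

-- ===== CLAIM (what is proved, stated in full; the proofs are below) =====
def Claim_equal_findLongestSubstringWithK : Prop := ∀ (s : String) (k : Int), Dom_findLongestSubstringWithK s k → Spec_findLongestSubstringWithK s k (findLongestSubstringWithK s k)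

-- ===== LEMMAS AND PROOFS =====

-- the window s[i:i+k]
def pvW (l : List Char) (k i : Int) : List Char := PySem.List.slice l (some i) (some (i + k))

-- A's per-window test
def pvQ (l : List Char) (k : Int) (i : Int) : Bool :=
  (pvW l k i).length == (PySem.Set.ofList (pvW l k i)).length

-- minimal start of a duplicate-free window of the first m characters ending at m
def pvMs (l : List Char) (m : Nat) : Nat :=
  Nat.find (p := fun i => ((l.take m).drop i).Nodup) ⟨m, by simp⟩

-- reference value of B's 'best' after m loop iterations
def pvBestRef (l : List Char) (k : Int) : Nat → Int
  | 0 => -1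
  | m + 1 => if (m : Int) - (pvMs l (m + 1) : Int) + 1 ≥ k then (m : Int) - k + 1 else pvBestRef l k m

-- a 'keep the last hit' fold is a find? on the reversed list
theorem pv_foldl_last_if {α β : Type} (q : α → Bool) (g : α → β) (xs : List α) (init : β) :
    xs.foldl (fun r i => if q i then g i else r) init =
      (match xs.reverse.find? q with | some i => g i | none => init) := by
  induction xs generalizing init with
  | nil => simp
  | cons x t ih =>
    simp only [List.foldl_cons, List.reverse_cons, List.find?_append, ih]
    cases h : t.reverse.find? q with
    | some i => simp [h]
    | none => simp [h, List.find?]; cases hq : q x <;> simp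

theorem pv_add_len_le (acc : List Char) (w : List Char) :
    (List.foldl PySem.Set.add acc w).length ≤ acc.length + w.length := by
  induction w generalizing acc with
  | nil => simp
  | cons x t ih =>
    simp only [List.foldl_cons, PySem.Set.add]
    simp only [List.length_cons]
    split
    · have := ih acc; omega
    · have := ih (acc ++ [x])
      simp only [List.length_append, List.length_singleton] at this
      omega

theorem pv_add_len_lt (w : List Char) (acc : List Char)
    (h : (∃ y ∈ w, y ∈ acc) ∨ ¬ w.Nodup) :
    (List.foldl PySem.Set.add acc w).length < acc.length + w.length := by
  induction w generalizing acc with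
  | nil =>
    rcases h with ⟨y, hy, _⟩ | h
    · exact absurd hy (by simp)
    · exact absurd List.nodup_nil h
  | cons x t ih =>
    simp only [List.foldl_cons, PySem.Set.add]
    simp only [List.length_cons]
    split
    · have := pv_add_len_le acc t; omega
    · rename_i hc
      have hx : x ∉ acc := by
        intro hm; exact hc (by simpa [List.contains_iff] using hm)
      have h' : (∃ y ∈ t, y ∈ acc ++ [x]) ∨ ¬ t.Nodup := by
        rcases h with ⟨y, hy, hya⟩ | hnd
        · rcases List.mem_cons.mp hy with rfl | hyt
          · exact absurd hya hx
          · exact Or.inl ⟨y, hyt, by simp [hya]⟩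
        · rw [List.nodup_cons] at hnd
          push_neg at hnd
          by_cases hxt : x ∈ t
          · exact Or.inl ⟨x, hxt, by simp⟩
          · exact Or.inr (hnd hxt)
      have := ih (acc ++ [x]) h'
      simp only [List.length_append, List.length_singleton] at this
      omega

theorem pv_add_eq (w : List Char) (acc : List Char)
    (hnd : w.Nodup) (hdisj : ∀ y ∈ w, y ∉ acc) :
    List.foldl PySem.Set.add acc w = acc ++ w := by
  induction w generalizing acc with
  | nil => simp
  | cons x t ih =>
    simp only [List.foldl_cons, PySem.Set.add]
    have hx : x ∉ acc := hdisj x (by simp)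
    rw [if_neg (by simpa [List.contains_iff] using hx)]
    rw [List.nodup_cons] at hnd
    rw [ih (acc ++ [x]) hnd.2]
    · simp
    · intro y hy
      simp only [List.mem_append, List.mem_singleton]
      rintro (h | rfl)
      · exact hdisj y (by simp [hy]) h
      · exact hnd.1 hy

-- set(w) has the same size as w iff w has no duplicates
theorem pv_setLen (w : List Char) : ((PySem.Set.ofList w).length = w.length) ↔ w.Nodup := by
  rw [PySem.Set.ofList_eq_foldl]
  constructor
  · intro h
    by_contra hnd
    have := pv_add_len_lt w [] (Or.inr hnd)
    simp at this; omega
  · intro hnd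
    rw [pv_add_eq w [] hnd (by simp)]; simp

-- pvMs characterizes duplicate-freeness of suffix windows
theorem pv_ms_iff (l : List Char) (m i : Nat) :
    ((l.take m).drop i).Nodup ↔ pvMs l m ≤ i := by
  unfold pvMs
  constructor
  · intro h; exact Nat.find_min' _ h
  · intro h
    have hspec := Nat.find_spec (p := fun i => ((l.take m).drop i).Nodup) ⟨m, by simp⟩
    set j := Nat.find (p := fun i => ((l.take m).drop i).Nodup) ⟨m, by simp⟩ with hj
    have : (l.take m).drop i = ((l.take m).drop j).drop (i - j) := by
      rw [List.drop_drop]; congr 1; omega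
    rw [this]
    exact hspec.sublist (List.drop_sublist _ _)

theorem pv_nodup_concat (w : List Char) (c : Char) : (w ++ [c]).Nodup ↔ w.Nodup ∧ c ∉ w := by
  simp [List.nodup_append]
  intro _
  constructor
  · intro h hc
    exact h c hc rfl
  · intro h a ha hac
    exact h (hac ▸ ha)

-- B's loop invariant: after m iterations the state is
-- (last-seen indices of the first m chars, min duplicate-free start, reference best)
theorem pv_bInv (l : List Char) (k : Int) (m : Nat) (hm : m ≤ l.length) :
    ∃ d : PySem.Dict Char Int,
      (PySem.List.enumerate (l.take m) 0).foldl (bStep k) (PySem.Dict.empty, 0, -1)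
        = (d, ((pvMs l m : Int), pvBestRef l k m))
      ∧ (∀ c : Char, -1 ≤ d.getD c (-1) ∧ d.getD c (-1) < (m : Int))
      ∧ (∀ (c : Char) (i : Nat), i ≤ m → (d.getD c (-1) < (i : Int) ↔ c ∉ (l.take m).drop i)) := by
  induction m with
  | zero =>
    refine ⟨PySem.Dict.empty, ?_, ?_, ?_⟩
    · have hms : pvMs l 0 = 0 := by
        unfold pvMs; rw [Nat.find_eq_zero]; simp
      simp [hms, pvBestRef, PySem.List.enumerate_nil]
    · intro c; simp [pysem]
    · intro c i hi; interval_cases i; simp [pysem]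
  | succ m ih =>
    have hml : m < l.length := by omega
    obtain ⟨d, hstate, hlow, hchar⟩ := ih (by omega)
    have htake : l.take (m+1) = l.take m ++ [l[m]] := List.take_succ_eq_append_getElem hml
    have hlen : (l.take m).length = m := by simp [List.length_take]; omega
    -- the new state is one bStep on the old one
    have hstep : (PySem.List.enumerate (l.take (m+1)) 0).foldl (bStep k) (PySem.Dict.empty, 0, -1)
        = bStep k (d, ((pvMs l m : Int), pvBestRef l k m)) ((m : Int), l[m]) := by
      rw [htake, PySem.List.enumerate_append, List.foldl_append, hstate,
        PySem.List.enumerate_cons, PySem.List.enumerate_nil, hlen]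
      simp
    set c := l[m] with hc
    set prev := d.getD c (-1) with hprev
    -- duplicate-freeness of windows ending at m+1, for starts i ≤ m
    have hwin : ∀ i : Nat, i ≤ m →
        (((l.take (m+1)).drop i).Nodup ↔ (pvMs l m ≤ i ∧ prev < (i : Int))) := by
      intro i hi
      rw [htake, List.drop_append_of_le_length (by omega), pv_nodup_concat,
        pv_ms_iff, ← hchar c i hi]
    have hmsle : pvMs l (m+1) ≤ m := by
      have : ((l.take (m+1)).drop m).Nodup := by
        rw [htake, List.drop_append_of_le_length (by omega),
          List.drop_eq_nil_of_le (le_of_eq hlen)]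
        simp
      rw [pv_ms_iff] at this; exact this
    -- the updated start equals pvMs l (m+1)
    have hnew : (if prev ≥ (pvMs l m : Int) then prev + 1 else (pvMs l m : Int)) = ((pvMs l (m+1) : Nat) : Int) := by
      have h1 : pvMs l m ≤ pvMs l (m+1) ∧ prev < (pvMs l (m+1) : Int) := by
        have := (hwin (pvMs l (m+1)) hmsle).mp ((pv_ms_iff l (m+1) _).mpr le_rfl)
        exact_mod_cast this
      have hprevlow := (hlow c).1
      have hprevhigh := (hlow c).2
      set t : Nat := if prev ≥ (pvMs l m : Int) then (prev + 1).toNat else pvMs l m with ht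
      have htval : (if prev ≥ (pvMs l m : Int) then prev + 1 else (pvMs l m : Int)) = (t : Int) := by
        rw [ht]; split <;> [simp; simp] <;> omega
      have htm : t ≤ m := by
        have := pv_ms_iff l m (pvMs l m) |>.mpr le_rfl
        have hmm : pvMs l m ≤ m := Nat.find_min' _ (by simp)
        rw [ht]; split <;> omega
      have h2 : pvMs l (m+1) ≤ t := by
        rw [← pv_ms_iff]
        rw [hwin t htm]
        constructor
        · rw [ht]; split <;> omega
        · rw [ht]; split <;> omega
      rw [htval]
      have := h1.1; have := h1.2
      congr 1
      omega
    refine ⟨d.insert c (m : Int), ?_, ?_, ?_⟩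
    · rw [hstep]
      show (d.insert c (m:Int),
        (if prev ≥ ((pvMs l m : Nat) : Int) then prev + 1 else ((pvMs l m : Nat):Int)),
        _) = _
      rw [hnew]
      refine Prod.ext rfl (Prod.ext rfl ?_)
      show (if (m:Int) - ((pvMs l (m+1) : Nat) : Int) + 1 ≥ k then (m:Int) - k + 1 else pvBestRef l k m) = pvBestRef l k (m+1)
      rfl
    · intro c'
      rw [PySem.Dict.getD_insert]
      split
      · constructor <;> omega
      · have := hlow c'; constructor <;> omega
    · intro c' i hi
      rw [PySem.Dict.getD_insert]
      by_cases hii : i ≤ m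
      · rw [htake, List.drop_append_of_le_length (by omega)]
        simp only [List.mem_append, List.mem_singleton]
        split
        · subst c'
          constructor
          · intro h; omega
          · intro h; exact absurd (Or.inr rfl) h
        · rename_i hne
          rw [hchar c' i hii]
          constructor
          · intro h hmem; rcases hmem with h' | h' ; exact h h'; exact hne h'
          · intro h h'; exact h (Or.inl h')
      · have hieq : i = m + 1 := by omega
        subst hieq
        have : (l.take (m+1)).drop (m+1) = [] := by
          apply List.drop_eq_nil_of_le; simp [List.length_take]
        rw [this]
        simp only [List.not_mem_nil, iff_true, not_false_iff]
        split
        · omega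
        · have := (hlow c').2; omega

-- A's window test at the window ending at index m is B's start condition
theorem pv_q_iff (l : List Char) (k : Int) (m : Nat) (hk : 1 ≤ k) (hkm : k ≤ (m : Int) + 1) :
    (pvQ l k ((m : Int) - k + 1) = true) ↔ ((m : Int) - (pvMs l (m + 1) : Int) + 1 ≥ k) := by
  have hkn : (k.toNat : Int) = k := Int.toNat_of_nonneg (by omega)
  set j : Nat := m + 1 - k.toNat with hj
  have h1 : (m : Int) - k + 1 = (j : Int) := by omega
  have h2 : (j : Int) + k = ((m + 1 : Nat) : Int) := by push_cast; omega
  have hwin : pvW l k ((m : Int) - k + 1) = (l.take (m+1)).drop j := by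
    unfold pvW
    rw [h1, h2, PySem.List.slice_natCast, List.drop_take]
  unfold pvQ
  rw [hwin, beq_iff_eq, eq_comm, pv_setLen, pv_ms_iff]
  omega

-- B's final 'best' is the last valid window start that A's scan sees
theorem pv_bestRef_eq (l : List Char) (k : Int) (hk : 1 ≤ k) (m : Nat) :
    pvBestRef l k m =
      (match (PySem.List.pyRange 0 ((m : Int) - k + 1) 1).reverse.find? (pvQ l k) with
       | some i => i | none => -1) := by
  induction m with
  | zero =>
    rw [PySem.List.pyRange_one_eq_nil (by omega)]
    rfl
  | succ m ih =>
    by_cases hkm : k ≤ (m : Int) + 1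
    · have hsplit : PySem.List.pyRange 0 (((m+1 : Nat) : Int) - k + 1) 1
          = PySem.List.pyRange 0 ((m : Int) - k + 1) 1 ++ [(m : Int) - k + 1] := by
        have : ((m+1 : Nat) : Int) - k + 1 = ((m : Int) - k + 1) + 1 := by push_cast; ring
        rw [this]
        exact PySem.List.pyRange_one_succ_right (by omega)
      rw [hsplit, List.reverse_append]
      show pvBestRef l k (m+1) = _
      simp only [List.reverse_cons, List.reverse_nil, List.nil_append, List.cons_append,
        List.find?_cons]
      cases hq : pvQ l k ((m : Int) - k + 1) with
      | true =>
        have hcond := (pv_q_iff l k m hk hkm).mp hq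
        show (if (m : Int) - (pvMs l (m + 1) : Int) + 1 ≥ k then (m : Int) - k + 1 else pvBestRef l k m) = _
        rw [if_pos hcond]
      | false =>
        have hcond : ¬ ((m : Int) - (pvMs l (m + 1) : Int) + 1 ≥ k) := by
          intro h; rw [(pv_q_iff l k m hk hkm).mpr h] at hq; cases hq
        show (if (m : Int) - (pvMs l (m + 1) : Int) + 1 ≥ k then (m : Int) - k + 1 else pvBestRef l k m) = _
        rw [if_neg hcond, ih]
    · have hcond : ¬ ((m : Int) - (pvMs l (m + 1) : Int) + 1 ≥ k) := by
        have : (0 : Int) ≤ (pvMs l (m+1) : Int) := by positivity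
        omega
      have hnil1 : PySem.List.pyRange 0 (((m+1 : Nat) : Int) - k + 1) 1 = [] :=
        PySem.List.pyRange_one_eq_nil (by push_cast; omega)
      have hnil2 : PySem.List.pyRange 0 ((m : Int) - k + 1) 1 = [] :=
        PySem.List.pyRange_one_eq_nil (by omega)
      rw [hnil1]
      rw [hnil2] at ih
      show (if (m : Int) - (pvMs l (m + 1) : Int) + 1 ≥ k then (m : Int) - k + 1 else pvBestRef l k m) = _
      rw [if_neg hcond, ih]

-- for k ≤ 0 the final window s[n-k : n-k+k] of A's scan is empty
theorem pv_slice_end (l : List Char) (k : Int) (hk : k ≤ 0) :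
    PySem.List.slice l (some ((l.length : Int) - k)) (some ((l.length : Int) - k + k)) = [] := by
  have h : (l.length : Int) - k + k = (l.length : Int) := by ring
  rw [h]
  apply List.eq_nil_of_length_eq_zero
  rw [PySem.List.length_slice]
  unfold PySem.List.clampIdx
  split_ifs <;> omega

-- A's fold written through pvQ / pvW
theorem pv_A_eq (s : String) (k : Int) :
    findLongestSubstringWithK s k =
      String.ofList ((PySem.List.pyRange 0 ((s.toList.length : Int) - k + 1) 1).foldl
        (fun r i => if pvQ s.toList k i then pvW s.toList k i else r) []) := by
  rfl

-- ===== VERDICT (by name: the statement is the Claim_ definition above) =====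
theorem findLongestSubstringWithK_spec : Claim_equal_findLongestSubstringWithK := by
  intro s k _
  unfold Spec_findLongestSubstringWithK
  by_cases hk : k ≤ 0
  · -- both sides return '': A's last window s[n-k:n] is empty and duplicate-free
    have hB : findLongestSubstringWithK_alt s k = "" := by
      unfold findLongestSubstringWithK_alt; rw [if_pos hk]
    rw [hB, pv_A_eq, pv_foldl_last_if]
    have hsplit : PySem.List.pyRange 0 ((s.toList.length : Int) - k + 1) 1
        = PySem.List.pyRange 0 ((s.toList.length : Int) - k) 1 ++ [(s.toList.length : Int) - k] :=
      PySem.List.pyRange_one_succ_right (by omega)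
    have hW : pvW s.toList k ((s.toList.length : Int) - k) = [] := by
      unfold pvW; exact pv_slice_end s.toList k hk
    have hQ : pvQ s.toList k ((s.toList.length : Int) - k) = true := by
      unfold pvQ; rw [hW]; rfl
    rw [hsplit, List.reverse_append]
    simp only [List.reverse_cons, List.reverse_nil, List.nil_append, List.cons_append,
      List.find?_cons, hQ]
    rw [hW]
  · -- k ≥ 1: both sides return the last duplicate-free window of length k
    push_neg at hk
    have hk1 : 1 ≤ k := hk
    obtain ⟨d, hstate, -, -⟩ := pv_bInv s.toList k s.toList.length le_rfl
    rw [List.take_length] at hstate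
    have hB : findLongestSubstringWithK_alt s k =
        (if pvBestRef s.toList k s.toList.length < 0 then "" else
          String.ofList (PySem.List.slice s.toList (some (pvBestRef s.toList k s.toList.length))
            (some (pvBestRef s.toList k s.toList.length + k)))) := by
      unfold findLongestSubstringWithK_alt
      rw [if_neg (by omega), hstate]
    rw [pv_A_eq, pv_foldl_last_if, hB, pv_bestRef_eq s.toList k hk1 s.toList.length]
    cases hfind : (PySem.List.pyRange 0 ((s.toList.length : Int) - k + 1) 1).reverse.find? (pvQ s.toList k) with
    | none => simp
    | some i =>
      have hi0 : 0 ≤ i := by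
        have hm := List.mem_of_find?_eq_some hfind
        rw [List.mem_reverse] at hm
        exact (PySem.List.mem_pyRange_one.mp hm).1
      show String.ofList (pvW s.toList k i)
        = (if i < 0 then "" else String.ofList (PySem.List.slice s.toList (some i) (some (i + k))))
      rw [if_neg (by omega)]
      rfl
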